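-- pv_equiv track=rewrite | github.com/r2talk-bit/r2bit_TripAudit | src/graph_utils.py | generate_formatted_policies_report
-- ===== SOURCE A (Python) =====
-- from typing import Union, Dict, Any, List
--
-- def generate_formatted_policies_report(formatted_policies: List[Dict[str, Any]]) -> str:
--     """
--     Generate a readable plain text report from formatted policies.
--
--     Args:
--         formatted_policies: List of formatted policy dictionaries
--
--     Returns:
--         A plain text report summarizing the policies
--     """
--     if not formatted_policies:
--         return "No policies found."
--
--     report_lines = []
--     report_lines.append("=== POLICY SUMMARY REPORT ===")
--     report_lines.append(f"Total policies: {len(formatted_policies)}")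
--     report_lines.append("")
--
--     # Group policies by category
--     policies_by_category = {}
--     for policy in formatted_policies:
--         category = policy.get("category", "General")
--         if category not in policies_by_category:
--             policies_by_category[category] = []
--         policies_by_category[category].append(policy)
--
--     # Add policies by category
--     for category, policies in policies_by_category.items():
--         report_lines.append(f"== {category} Policies ({len(policies)}) ==")
--
--         for i, policy in enumerate(policies):
--             # Clean up the description by replacing newlines with spaces
--             description = policy.get("description", "").replace("\n", " ").strip()
--
--             report_lines.append(f"[{i+1}] {policy.get('policy_title', 'Untitled Policy')}")
--             report_lines.append(f"    ID: {policy.get('policy_id', 'N/A')}")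
--             report_lines.append(f"    Priority: {policy.get('priority', 'medium').upper()}")
--             report_lines.append(f"    Summary: {description}")
--             report_lines.append("")
--
--     report_lines.append("=== END OF POLICY REPORT ===")
--     return "\n".join(report_lines)
-- ===== SOURCE B (Python) =====
-- from typing import Dict, Any, List
--
--
-- def _policy_block(i, policy):
--     description = policy.get("description", "").replace("\n", " ").strip()
--     return [
--         f"[{i}] {policy.get('policy_title', 'Untitled Policy')}",
--         f"    ID: {policy.get('policy_id', 'N/A')}",
--         f"    Priority: {policy.get('priority', 'medium').upper()}",
--         f"    Summary: {description}",
--         "",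
--     ]
--
--
-- def _category_block(category, group):
--     return [f"== {category} Policies ({len(group)}) =="] + [
--         line for i, p in enumerate(group, 1) for line in _policy_block(i, p)
--     ]
--
--
-- def generate_formatted_policies_report(formatted_policies: List[Dict[str, Any]]) -> str:
--     if not formatted_policies:
--         return "No policies found."
--     categories = list(dict.fromkeys(
--         p.get("category", "General") for p in formatted_policies))
--     body = [
--         line
--         for c in categories
--         for line in _category_block(
--             c, [p for p in formatted_policies if p.get("category", "General") == c])
--     ]
--     return "\n".join(
--         ["=== POLICY SUMMARY REPORT ===",
--          f"Total policies: {len(formatted_policies)}",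
--          ""]
--         + body
--         + ["=== END OF POLICY REPORT ==="])
-- ===== Notes on version B (the rewrite author's own statement) =====
-- stated objective: alternative
-- what changed: Replaces the single grouping pass that builds a dict of per-category lists plus an append-accumulator of report lines with a dedup of first-seen categories followed by one filter pass per category, assembling the report functionally from per-category/per-policy block helpers joined at the end.
import Mathlib
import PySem

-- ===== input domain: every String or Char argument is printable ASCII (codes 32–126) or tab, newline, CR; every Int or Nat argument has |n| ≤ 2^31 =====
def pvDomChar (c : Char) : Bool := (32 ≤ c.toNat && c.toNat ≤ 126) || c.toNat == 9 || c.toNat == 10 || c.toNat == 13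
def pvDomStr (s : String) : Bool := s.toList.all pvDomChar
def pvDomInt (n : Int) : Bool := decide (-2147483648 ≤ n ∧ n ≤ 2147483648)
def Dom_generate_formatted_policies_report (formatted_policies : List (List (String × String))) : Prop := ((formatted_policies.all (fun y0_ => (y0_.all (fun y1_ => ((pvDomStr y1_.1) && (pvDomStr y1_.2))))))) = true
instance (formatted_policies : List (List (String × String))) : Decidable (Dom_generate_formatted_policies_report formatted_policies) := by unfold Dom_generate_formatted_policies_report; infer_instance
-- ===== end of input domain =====

-- B restates the report as dedup-of-categories + one filter per category with functional block helpers,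
-- instead of A's dict-grouping pass + append-accumulator of lines (objective: alternative decomposition).

-- shared helper: policy.get(key, default) on the association-list encoding of a Python dict (first match)
def pvGet (policy : List (String × String)) (key dflt : String) : String :=
  (PySem.Dict.mk policy).getD key dflt

-- ===== PORT A =====
def generate_formatted_policies_report (formatted_policies : List (List (String × String))) : String :=
  if formatted_policies = [] then "No policies found." else
  let report_lines : List String :=
    ["=== POLICY SUMMARY REPORT ===",
     "Total policies: " ++ PySem.Int.toStr (formatted_policies.length : Int),
     ""]
  -- group policies by category
  let policies_by_category : PySem.Dict String (List (List (String × String))) :=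
    formatted_policies.foldl (fun d policy =>
      let category := pvGet policy "category" "General"
      let d := if d.contains category then d else d.insert category []
      d.modify category [] (fun l => l ++ [policy])) PySem.Dict.empty
  -- add policies by category
  let report_lines := policies_by_category.items.foldl (fun lines cp =>
    let lines := lines ++ ["== " ++ cp.1 ++ " Policies (" ++ PySem.Int.toStr (cp.2.length : Int) ++ ") =="]
    (PySem.List.enumerate cp.2 0).foldl (fun lines ip =>
      let description := PySem.Str.strip (PySem.Str.replace (pvGet ip.2 "description" "") "\n" " ")
      lines ++
        ["[" ++ PySem.Int.toStr (ip.1 + 1) ++ "] " ++ pvGet ip.2 "policy_title" "Untitled Policy",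
         "    ID: " ++ pvGet ip.2 "policy_id" "N/A",
         "    Priority: " ++ PySem.Str.upper (pvGet ip.2 "priority" "medium"),
         "    Summary: " ++ description,
         ""]) lines) report_lines
  PySem.Str.join "\n" (report_lines ++ ["=== END OF POLICY REPORT ==="])

-- ===== PORT B =====
def pvPolicyBlock (i : Int) (policy : List (String × String)) : List String :=
  let description := PySem.Str.strip (PySem.Str.replace (pvGet policy "description" "") "\n" " ")
  ["[" ++ PySem.Int.toStr i ++ "] " ++ pvGet policy "policy_title" "Untitled Policy",
   "    ID: " ++ pvGet policy "policy_id" "N/A",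
   "    Priority: " ++ PySem.Str.upper (pvGet policy "priority" "medium"),
   "    Summary: " ++ description,
   ""]

def pvCategoryBlock (category : String) (group : List (List (String × String))) : List String :=
  ("== " ++ category ++ " Policies (" ++ PySem.Int.toStr (group.length : Int) ++ ") ==") ::
    (PySem.List.enumerate group 1).flatMap (fun ip => pvPolicyBlock ip.1 ip.2)

def generate_formatted_policies_report_alt (formatted_policies : List (List (String × String))) : String :=
  if formatted_policies = [] then "No policies found." else
  let categories := PySem.List.dedup (formatted_policies.map (fun p => pvGet p "category" "General"))
  let body := categories.flatMap (fun c =>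
    pvCategoryBlock c (formatted_policies.filter (fun p => pvGet p "category" "General" == c)))
  PySem.Str.join "\n"
    (["=== POLICY SUMMARY REPORT ===",
      "Total policies: " ++ PySem.Int.toStr (formatted_policies.length : Int),
      ""]
     ++ body
     ++ ["=== END OF POLICY REPORT ==="])

-- ===== PRECONDITION & SPEC =====
def Spec_generate_formatted_policies_report (formatted_policies : List (List (String × String))) (out : String) : Prop := out = generate_formatted_policies_report_alt formatted_policies
instance (formatted_policies : List (List (String × String))) (out : String) : Decidable (Spec_generate_formatted_policies_report formatted_policies out) := by unfold Spec_generate_formatted_policies_report; infer_instance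

-- ===== CLAIM (what is proved, stated in full; the proofs are below) =====
def Claim_equal_generate_formatted_policies_report : Prop := ∀ (formatted_policies : List (List (String × String))), Dom_generate_formatted_policies_report formatted_policies → Spec_generate_formatted_policies_report formatted_policies (generate_formatted_policies_report formatted_policies)

-- ===== LEMMAS AND PROOFS =====

-- A's grouping step "if absent insert []; then append" is the same dict as a single modify-append.
theorem pv_step_eq_modify (d : PySem.Dict String (List (List (String × String))))
    (c : String) (p : List (String × String)) :
    (let d' := if d.contains c then d else d.insert c []
     d'.modify c [] (fun l => l ++ [p])) = d.modify c [] (fun l => l ++ [p]) := by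
  by_cases h : d.contains c
  · simp [h]
  · simp only [h, Bool.false_eq_true, if_false, PySem.Dict.modify,
      PySem.Dict.insert_insert_self, PySem.Dict.getD_insert_self,
      PySem.Dict.getD_of_not_contains _ _ (by simpa using h)]

-- A's inner enumerate-from-0-plus-one fold equals B's enumerate-from-s lines
theorem pv_enum_shift (f : Int → List (String × String) → List String)
    (xs : List (List (String × String))) (s : Int) :
    (PySem.List.enumerate xs s).flatMap (fun ip => f (ip.1 + 1) ip.2)
      = (PySem.List.enumerate xs (s + 1)).flatMap (fun ip => f ip.1 ip.2) := by
  induction xs generalizing s with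
  | nil => simp [PySem.List.enumerate_nil]
  | cons x xs ih => simp [PySem.List.enumerate_cons, ih]

theorem generate_formatted_policies_report_eq (fps : List (List (String × String))) :
    generate_formatted_policies_report fps = generate_formatted_policies_report_alt fps := by
  unfold generate_formatted_policies_report generate_formatted_policies_report_alt
  by_cases hnil : fps = []
  · simp [hnil]
  · simp only [hnil, if_false]
    set cat : List (String × String) → String := fun p => pvGet p "category" "General" with hcat
    -- rewrite A's grouping fold into the pure modify fold
    have hfold :
        fps.foldl (fun d policy =>
            let category := pvGet policy "category" "General"
            let d := if d.contains category then d else d.insert category []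
            d.modify category [] (fun l => l ++ [policy])) PySem.Dict.empty
          = fps.foldl (fun d policy => d.modify (cat policy) [] (fun l => l ++ [policy]))
              PySem.Dict.empty := by
      apply PySem.List.foldl_congr_mem
      intro d p _
      simpa using pv_step_eq_modify d (cat p) p
    rw [hfold]
    set D := fps.foldl (fun d policy => d.modify (cat policy) [] (fun l => l ++ [policy]))
        PySem.Dict.empty with hD
    have hnodup : D.keys.Nodup := by
      rw [hD]
      exact PySem.Dict.nodup_keys_foldl_modify_key fps cat [] (fun _ p _ => _ ++ [p]) _
        (by simp [PySem.Dict.keys_empty])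
    have hkeys : D.keys = PySem.List.dedup (fps.map cat) := by
      rw [hD, PySem.Dict.keys_foldl_modify_key fps cat [] (fun _ p l => l ++ [p]),
        PySem.Dict.keys_empty, PySem.Set.update_nil_left, PySem.List.dedup_eq_ofList]
    have hgetD : ∀ c, D.getD c [] = fps.filter (fun p => cat p == c) := by
      intro c
      have := PySem.Dict.getD_foldl_modify_append (fps.map (fun p => (cat p, p)))
        PySem.Dict.empty c
      rw [List.foldl_map] at this
      simpa [List.filter_map, Function.comp_def] using this
    have hitems : D.items
        = (PySem.List.dedup (fps.map cat)).map
            (fun c => (c, fps.filter (fun p => cat p == c))) := by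
      rw [PySem.Dict.items_eq_map_keys D hnodup [], hkeys]
      exact List.map_congr_left (fun c _ => by rw [hgetD c])
    rw [hitems]
    -- turn A's accumulator folds into flatMap
    have houter : ∀ (init : List String) (items : List (String × List (List (String × String)))),
        items.foldl (fun lines cp =>
          let lines := lines ++ ["== " ++ cp.1 ++ " Policies (" ++ PySem.Int.toStr (cp.2.length : Int) ++ ") =="]
          (PySem.List.enumerate cp.2 0).foldl (fun lines ip =>
            let description := PySem.Str.strip (PySem.Str.replace (pvGet ip.2 "description" "") "\n" " ")
            lines ++
              ["[" ++ PySem.Int.toStr (ip.1 + 1) ++ "] " ++ pvGet ip.2 "policy_title" "Untitled Policy",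
               "    ID: " ++ pvGet ip.2 "policy_id" "N/A",
               "    Priority: " ++ PySem.Str.upper (pvGet ip.2 "priority" "medium"),
               "    Summary: " ++ description,
               ""]) lines) init
        = init ++ items.flatMap (fun cp => pvCategoryBlock cp.1 cp.2) := by
      intro init items
      have hstep : ∀ (lines : List String) (cp : String × List (List (String × String))),
          (let lines := lines ++ ["== " ++ cp.1 ++ " Policies (" ++ PySem.Int.toStr (cp.2.length : Int) ++ ") =="]
           (PySem.List.enumerate cp.2 0).foldl (fun lines ip =>
             let description := PySem.Str.strip (PySem.Str.replace (pvGet ip.2 "description" "") "\n" " ")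
             lines ++
               ["[" ++ PySem.Int.toStr (ip.1 + 1) ++ "] " ++ pvGet ip.2 "policy_title" "Untitled Policy",
                "    ID: " ++ pvGet ip.2 "policy_id" "N/A",
                "    Priority: " ++ PySem.Str.upper (pvGet ip.2 "priority" "medium"),
                "    Summary: " ++ description,
                ""]) lines)
          = lines ++ pvCategoryBlock cp.1 cp.2 := by
        intro lines cp
        show (PySem.List.enumerate cp.2 0).foldl
            (fun lines ip => lines ++ pvPolicyBlock (ip.1 + 1) ip.2)
            (lines ++ ["== " ++ cp.1 ++ " Policies (" ++ PySem.Int.toStr (cp.2.length : Int) ++ ") =="])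
          = lines ++ pvCategoryBlock cp.1 cp.2
        rw [PySem.List.foldl_append_eq_flatMap
          (fun ip : Int × List (String × String) => pvPolicyBlock (ip.1 + 1) ip.2)]
        rw [pv_enum_shift (fun i p => pvPolicyBlock i p) cp.2 0]
        simp [pvCategoryBlock]
      calc items.foldl _ init
          = items.foldl (fun lines cp => lines ++ pvCategoryBlock cp.1 cp.2) init := by
            exact PySem.List.foldl_congr_mem _ _ _ _ (fun lines cp _ => hstep lines cp)
        _ = init ++ items.flatMap (fun cp => pvCategoryBlock cp.1 cp.2) :=
            PySem.List.foldl_append_eq_flatMap _ items init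
    rw [houter]
    simp only [List.flatMap_map, List.append_assoc, hcat]

-- ===== VERDICT (by name: the statement is the Claim_ definition above) =====
theorem generate_formatted_policies_report_spec : Claim_equal_generate_formatted_policies_report := by
  intro fps _
  exact generate_formatted_policies_report_eq fps
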